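-- pv_equiv track=rewrite | github.com/Seojeil/Algorithm | Python/백준/Silver/1992. 쿼드트리/쿼드트리.py | is_uniform
-- ===== SOURCE A (Python) =====
-- def is_uniform(video):
--     """전체 블록이 모두 같은 값인지 확인"""
--     if not video or not video[0]:
--         return True
--
--     first_char = video[0][0]
--     for row in video:
--         for char in row:
--             if char != first_char:
--                 return False
--     return True
-- ===== SOURCE B (Python) =====
-- def is_uniform(video):
--     """전체 블록이 모두 같은 값인지 확인"""
--     if not video or not video[0]:
--         return True
--     flat = [c for row in video for c in row]
--     return all(x == y for x, y in zip(flat, flat[1:]))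
-- ===== Notes on version B (the rewrite author's own statement) =====
-- stated objective: alternative
-- what changed: Instead of comparing every cell to the fixed reference cell video[0][0] with early return, B flattens the grid once and verifies uniformity as a transitive chain: every adjacent pair in the flattened sequence is equal.
import Mathlib
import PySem

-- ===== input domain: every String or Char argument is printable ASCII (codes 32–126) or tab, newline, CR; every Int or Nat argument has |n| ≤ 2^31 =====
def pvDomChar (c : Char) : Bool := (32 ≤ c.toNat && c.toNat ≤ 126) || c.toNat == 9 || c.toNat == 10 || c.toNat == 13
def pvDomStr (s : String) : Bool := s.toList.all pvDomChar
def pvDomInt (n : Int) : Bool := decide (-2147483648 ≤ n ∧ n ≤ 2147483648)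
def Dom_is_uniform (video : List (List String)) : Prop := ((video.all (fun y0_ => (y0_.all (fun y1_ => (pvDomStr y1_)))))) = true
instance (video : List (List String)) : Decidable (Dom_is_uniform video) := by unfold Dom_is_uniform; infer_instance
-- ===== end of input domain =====

-- B checks uniformity as a chain of adjacent-pair equalities over the flattened grid instead of comparing every cell to the reference cell video[0][0]; objective: alternative decomposition, same cost.


-- ===== PORT A =====
-- 'if not video or not video[0]: return True', then nested loops comparing each char to video[0][0] with early 'return False'
def is_uniform (video : List (List String)) : Bool :=
  match video with
  | [] => true
  | r0 :: _ =>
    match r0 with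
    | [] => true
    | first_char :: _ =>
      -- the nested for-loops with early 'return False' = all rows, all chars equal first_char
      video.all (fun row => row.all (fun c => c == first_char))

-- ===== PORT B =====
-- same guard, then flatten once and check every adjacent pair of the flattened sequence is equal
def is_uniform_alt (video : List (List String)) : Bool :=
  if video = [] ∨ video.headD [] = [] then true
  else
    let flat := video.flatMap (fun row => row)
    (flat.zip (flat.drop 1)).all (fun p => p.1 == p.2)

-- ===== PRECONDITION & SPEC =====
def Spec_is_uniform (video : List (List String)) (out : Bool) : Prop := out = is_uniform_alt video
instance (video : List (List String)) (out : Bool) : Decidable (Spec_is_uniform video out) := by unfold Spec_is_uniform; infer_instance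

-- ===== CLAIM (what is proved, stated in full; the proofs are below) =====
def Claim_equal_is_uniform : Prop := ∀ (video : List (List String)), Dom_is_uniform video → Spec_is_uniform video (is_uniform video)

-- ===== LEMMAS AND PROOFS =====
-- a nonempty list's adjacent pairs are all equal iff every element equals the head
theorem chain_all_iff (c0 : String) (cs : List String) :
    (((c0 :: cs).zip cs).all (fun p => p.1 == p.2)) = true ↔ ∀ c ∈ cs, c = c0 := by
  induction cs generalizing c0 with
  | nil => simp
  | cons c1 t ih =>
    simp only [List.zip_cons_cons, List.all_cons, Bool.and_eq_true, beq_iff_eq, ih,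
      List.mem_cons]
    constructor
    · rintro ⟨rfl, h⟩ c hc
      rcases hc with rfl | hc
      · rfl
      · exact h c hc
    · intro h
      refine ⟨(h c1 (Or.inl rfl)).symm, fun c hc => ?_⟩
      rw [h c (Or.inr hc), h c1 (Or.inl rfl)]

-- ===== VERDICT (by name: the statement is the Claim_ definition above) =====
theorem is_uniform_spec : Claim_equal_is_uniform := by
  intro video _
  unfold Spec_is_uniform
  match video with
  | [] => rfl
  | [] :: rest => rfl
  | (c0 :: cs) :: rest =>
    have hne : ¬(((c0 :: cs) :: rest : List (List String)) = [] ∨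
        ((c0 :: cs) :: rest).headD [] = ([] : List String)) := by simp
    simp only [is_uniform, is_uniform_alt, if_neg hne]
    have hflat : ((c0 :: cs) :: rest).flatMap (fun row => row)
        = c0 :: (cs ++ rest.flatMap (fun row => row)) := by simp
    rw [Bool.eq_iff_iff]
    simp only [hflat, List.drop_one, List.tail_cons]
    rw [chain_all_iff]
    simp only [List.all_eq_true, beq_iff_eq, List.mem_cons, List.mem_append,
      List.mem_flatMap]
    constructor
    · intro h c hc
      rcases hc with hc | ⟨row, hrow, hc⟩
      · exact h (c0 :: cs) (Or.inl rfl) c (List.mem_cons_of_mem _ hc)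
      · exact h row (Or.inr hrow) c hc
    · intro h row hrow c hc
      rcases hrow with heq | hrow
      · rw [heq] at hc
        rcases List.mem_cons.mp hc with heq2 | hc2
        · exact heq2
        · exact h c (Or.inl hc2)
      · exact h c (Or.inr ⟨row, hrow, hc⟩)
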